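-- pv_equiv track=rewrite | github.com/nkostopoulos/StochasticsLabPublic | lab7/naive_bayes.py | consonants
-- ===== SOURCE A (Python) =====
-- def consonants(prefix):
--     total_consonants = 0
--     consonants_sequence = list()
--     current_sequence = 0
--     for char in prefix:
--         if char != 'a' and char != 'e' and char != 'i' and char != 'o' and char != 'u' and char != '-' and char.isdigit() == False:
--             total_consonants += 1
--             current_sequence += 1
--         else:
--             consonants_sequence.append(current_sequence)
--             current_sequence = 0
--     consonants_sequence.append(current_sequence)
--     max_consonants_sequence = max(consonants_sequence)
--     return total_consonants, max_consonants_sequence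
-- ===== SOURCE B (Python) =====
-- def consonants(prefix):
--     n = len(prefix)
--     seps = [i for i, c in enumerate(prefix) if c in 'aeiou-' or c.isdigit()]
--     bounds = [-1] + seps + [n]
--     longest = max(b - a - 1 for a, b in zip(bounds, bounds[1:]))
--     return n - len(seps), longest
-- ===== Notes on version B (the rewrite author's own statement) =====
-- stated objective: alternative
-- what changed: A's run-length state machine (running counter, list of run lengths appended on each separator) is replaced by index arithmetic: B collects the positions of the separator characters (vowels, '-', digits) via enumerate, gets the total as len(prefix) minus the separator count, and the longest run as the maximum gap between consecutive separator boundaries (with -1 and len sentinels).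
import Mathlib
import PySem

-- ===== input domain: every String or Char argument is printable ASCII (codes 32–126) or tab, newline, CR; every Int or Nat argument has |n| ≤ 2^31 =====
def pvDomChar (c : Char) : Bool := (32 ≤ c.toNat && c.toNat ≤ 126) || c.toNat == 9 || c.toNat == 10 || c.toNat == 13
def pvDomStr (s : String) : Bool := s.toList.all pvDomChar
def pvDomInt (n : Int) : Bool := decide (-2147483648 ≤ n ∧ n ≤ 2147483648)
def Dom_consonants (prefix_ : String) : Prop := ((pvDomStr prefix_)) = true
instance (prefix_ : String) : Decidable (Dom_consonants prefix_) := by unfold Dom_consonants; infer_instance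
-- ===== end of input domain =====

-- B replaces A's run-length state machine by index arithmetic over the separator positions:
-- total = len - #separators, longest run = max gap between consecutive separator boundaries
-- (objective: alternative; same cost).

-- ===== PORT A =====
def pvIsConsA (c : Char) : Bool :=
  !(c == 'a') && !(c == 'e') && !(c == 'i') && !(c == 'o') && !(c == 'u') && !(c == '-')
    && (PySem.Chars.isdigit c == false)

def consonants (prefix_ : String) : Int × Int :=
  let st := prefix_.toList.foldl
    (fun (st : Int × List Int × Int) char =>
      if pvIsConsA char then (st.1 + 1, st.2.1, st.2.2 + 1)
      else (st.1, st.2.1 ++ [st.2.2], 0))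
    (0, [], 0)
  let seq := st.2.1 ++ [st.2.2]
  -- seq is never empty (current_sequence is always appended), so Python's max cannot raise;
  -- the .getD 0 default is unreachable.
  (st.1, (PySem.List.max? seq (fun x => x)).getD 0)

-- ===== PORT B =====
def pvIsSep (c : Char) : Bool :=
  (['a', 'e', 'i', 'o', 'u', '-'].contains c) || PySem.Chars.isdigit c

def consonants_alt (prefix_ : String) : Int × Int :=
  let l := prefix_.toList
  let n : Int := l.length
  let seps : List Int := ((PySem.List.enumerate l).filter (fun p => pvIsSep p.2)).map (·.1)
  let bounds : List Int := [-1] ++ seps ++ [n]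
  -- bounds has at least two elements, so the zip is nonempty and Python's max cannot raise;
  -- the .getD 0 default is unreachable.
  let longest :=
    (PySem.List.max? ((bounds.zip bounds.tail).map (fun p => p.2 - p.1 - 1)) (fun x => x)).getD 0
  (n - seps.length, longest)

-- ===== PRECONDITION & SPEC =====
def Spec_consonants (prefix_ : String) (out : Int × Int) : Prop := out = consonants_alt prefix_
instance (prefix_ : String) (out : Int × Int) : Decidable (Spec_consonants prefix_ out) := by unfold Spec_consonants; infer_instance

-- ===== CLAIM (what is proved, stated in full; the proofs are below) =====
def Claim_equal_consonants : Prop := ∀ (prefix_ : String), Dom_consonants prefix_ → Spec_consonants prefix_ (consonants prefix_)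

-- ===== LEMMAS AND PROOFS =====

lemma pvCons_not_sep (c : Char) : pvIsConsA c = !pvIsSep c := by
  simp only [pvIsConsA, pvIsSep, List.contains_cons, List.contains_nil]
  cases h : PySem.Chars.isdigit c <;> simp [BEq.comm, Bool.and_assoc]

-- the sequence of values A appends to consonants_sequence (including the final append),
-- starting from current_sequence = cur
def pvGseq : Int → List Char → List Int
  | cur, [] => [cur]
  | cur, c :: cs => if pvIsConsA c then pvGseq (cur + 1) cs else cur :: pvGseq 0 cs

def pvStepA (st : Int × List Int × Int) (char : Char) : Int × List Int × Int :=
  if pvIsConsA char then (st.1 + 1, st.2.1, st.2.2 + 1) else (st.1, st.2.1 ++ [st.2.2], 0)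

lemma pvFoldA (l : List Char) : ∀ (t cur : Int) (seq : List Int),
    (l.foldl pvStepA (t, seq, cur)).1 = t + (l.countP pvIsConsA : Int)
    ∧ (l.foldl pvStepA (t, seq, cur)).2.1 ++ [(l.foldl pvStepA (t, seq, cur)).2.2]
        = seq ++ pvGseq cur l := by
  induction l with
  | nil => intro t cur seq; simp [pvGseq]
  | cons c cs ih =>
    intro t cur seq
    by_cases h : pvIsConsA c = true
    · simp only [List.foldl_cons, pvStepA]
      rw [if_pos h]
      obtain ⟨ih1, ih2⟩ := ih (t + 1) (cur + 1) seq
      refine ⟨?_, ?_⟩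
      · rw [ih1, List.countP_cons, if_pos h]; push_cast; ring
      · rw [ih2, show pvGseq cur (c :: cs) = pvGseq (cur + 1) cs from by simp [pvGseq, h]]
    · simp only [List.foldl_cons, pvStepA]
      rw [if_neg (by simp [h])]
      obtain ⟨ih1, ih2⟩ := ih t 0 (seq ++ [cur])
      refine ⟨?_, ?_⟩
      · rw [ih1, List.countP_cons, if_neg (by simp [h])]; simp
      · have h' : pvIsConsA c = false := by simpa using h
        rw [ih2, show pvGseq cur (c :: cs) = cur :: pvGseq 0 cs from by simp [pvGseq, h']]
        simp

lemma pvConsonants_eq (s : String) :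
    consonants s = ((s.toList.countP pvIsConsA : Int),
        (PySem.List.max? (pvGseq 0 s.toList) (fun x => x)).getD 0) := by
  show ((s.toList.foldl pvStepA (0, [], 0)).1,
        (PySem.List.max? ((s.toList.foldl pvStepA (0, [], 0)).2.1
           ++ [(s.toList.foldl pvStepA (0, [], 0)).2.2]) (fun x => x)).getD 0) = _
  obtain ⟨h1, h2⟩ := pvFoldA s.toList 0 0 []
  rw [h1, h2]
  simp

-- the separator positions, counted from index i (Source B's comprehension)
def pvSepsFrom (i : Int) : List Char → List Int
  | [] => []
  | c :: cs => if pvIsSep c then i :: pvSepsFrom (i + 1) cs else pvSepsFrom (i + 1) cs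

lemma pvEnum_seps (l : List Char) : ∀ i : Int,
    ((PySem.List.enumerate l i).filter (fun p => pvIsSep p.2)).map (·.1) = pvSepsFrom i l := by
  induction l with
  | nil => intro i; simp [PySem.List.enumerate_nil, pvSepsFrom]
  | cons c cs ih =>
    intro i
    rw [PySem.List.enumerate_cons, pvSepsFrom]
    by_cases h : pvIsSep c = true
    · simp [h, ih]
    · have h' : pvIsSep c = false := by simpa using h
      simp [h', ih]

lemma pvSeps_length (l : List Char) : ∀ i : Int,
    (pvSepsFrom i l).length = l.countP pvIsSep := by
  induction l with
  | nil => intro i; simp [pvSepsFrom]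
  | cons c cs ih =>
    intro i
    rw [pvSepsFrom, List.countP_cons]
    by_cases h : pvIsSep c = true <;> simp [h, ih]

def pvGaps (bs : List Int) : List Int := (bs.zip bs.tail).map (fun p => p.2 - p.1 - 1)

lemma pvGaps_cons₂ (a b : Int) (t : List Int) :
    pvGaps (a :: b :: t) = (b - a - 1) :: pvGaps (b :: t) := by
  simp [pvGaps]

lemma pvGaps_eq_gseq (l : List Char) : ∀ (i cur : Int),
    pvGaps ((i - cur - 1) :: pvSepsFrom i l ++ [i + (l.length : Int)]) = pvGseq cur l := by
  induction l with
  | nil =>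
    intro i cur
    simp only [pvSepsFrom, List.length_nil, Nat.cast_zero, add_zero]
    simp [pvGaps, pvGseq]
    ring
  | cons c cs ih =>
    intro i cur
    have hlen : ((c :: cs).length : Int) = 1 + (cs.length : Int) := by
      simp; ring
    by_cases h : pvIsSep c = true
    · have hc : pvIsConsA c = false := by rw [pvCons_not_sep, h]; rfl
      rw [pvSepsFrom, if_pos h, hlen]
      have : (i - cur - 1) :: (i :: pvSepsFrom (i + 1) cs) ++ [i + (1 + (cs.length : Int))]
          = (i - cur - 1) :: i :: (pvSepsFrom (i + 1) cs ++ [(i + 1) + (cs.length : Int)]) := by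
        simp; ring_nf
      rw [this, pvGaps_cons₂, show i - (i - cur - 1) - 1 = cur from by ring]
      have ih' := ih (i + 1) 0
      rw [show (i + 1) - (0:Int) - 1 = i from by ring] at ih'
      rw [pvGseq, if_neg (by simp [hc])]
      exact congrArg (cur :: ·) ih'
    · have h' : pvIsSep c = false := by simpa using h
      have hc : pvIsConsA c = true := by rw [pvCons_not_sep, h']; rfl
      rw [pvSepsFrom, if_neg (by simp [h']), hlen,
        show i - cur - 1 = (i + 1) - (cur + 1) - 1 from by ring,
        show i + (1 + (cs.length : Int)) = (i + 1) + (cs.length : Int) from by ring]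
      rw [ih (i + 1) (cur + 1), pvGseq, if_pos hc]

lemma pvCount_split (l : List Char) :
    (l.length : Int) - (l.countP pvIsSep : Int) = (l.countP pvIsConsA : Int) := by
  induction l with
  | nil => simp
  | cons c cs ih =>
    rw [List.countP_cons, List.countP_cons, List.length_cons]
    by_cases h : pvIsSep c = true
    · have hc : pvIsConsA c = false := by rw [pvCons_not_sep, h]; rfl
      simp only [h, hc]
      push_cast
      omega
    · have h' : pvIsSep c = false := by simpa using h
      have hc : pvIsConsA c = true := by rw [pvCons_not_sep, h']; rfl
      simp only [h', hc]
      push_cast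
      omega

-- ===== VERDICT (by name: the statement is the Claim_ definition above) =====
theorem consonants_spec : Claim_equal_consonants := by
  intro prefix_ _
  unfold Spec_consonants
  rw [pvConsonants_eq]
  show _ = ((prefix_.toList.length : Int) - _, _)
  rw [pvEnum_seps prefix_.toList 0, pvSeps_length prefix_.toList 0]
  have hb : ([-1] ++ pvSepsFrom 0 prefix_.toList ++ [(prefix_.toList.length : Int)])
      = ((0 : Int) - 0 - 1) :: pvSepsFrom 0 prefix_.toList ++ [0 + (prefix_.toList.length : Int)] := by
    norm_num
  rw [hb]
  have := pvGaps_eq_gseq prefix_.toList 0 0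
  rw [show ((((0:Int) - 0 - 1) :: pvSepsFrom 0 prefix_.toList ++ [0 + (prefix_.toList.length : Int)]).zip
        (((0:Int) - 0 - 1) :: pvSepsFrom 0 prefix_.toList ++ [0 + (prefix_.toList.length : Int)]).tail).map
        (fun p => p.2 - p.1 - 1) = pvGaps (((0:Int) - 0 - 1) :: pvSepsFrom 0 prefix_.toList ++ [0 + (prefix_.toList.length : Int)]) from rfl,
     this, pvCount_split]
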